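-- pv_equiv track=rewrite | github.com/mmnvb/euler | 1/049/ES.py | prov
-- ===== SOURCE A (Python) =====
-- def prov(x , y , z):
--     m = []
--     a = int(x)
--     k = 0
--     for i in range(2, a // 2 + 1):
--         if (a % i == 0):
--             k = k + 1
--     if (k <= 0):
--         m.append(True)
--
--     else:
--         m.append(False)
--         return any(m)
--
--     a = int(y)
--     k = 0
--     for i in range(2, a // 2 + 1):
--         if (a % i == 0):
--             k = k + 1
--     if (k <= 0):
--         m.append(True)
--
--     else:
--         m.append(False)
--
--     a = int(z)
--     k = 0
--     for i in range(2, a // 2 + 1):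
--         if (a % i == 0):
--             k = k + 1
--     if (k <= 0):
--         m.append(True)
--
--     else:
--         m.append(False)
--     return all(m)
-- ===== SOURCE B (Python) =====
-- def prov(x, y, z):
--     def is_prime(n):
--         a = int(n)
--         i = 2
--         while i * i <= a:
--             if a % i == 0:
--                 return False
--             i += 1
--         return True
--     return is_prime(x) and is_prime(y) and is_prime(z)
-- ===== Notes on version B (the rewrite author's own statement) =====
-- stated objective: faster
-- what changed: B replaces A's three copy-pasted divisor-counting scans up to n//2 with a shared trial-division helper that stops at the first divisor and only tests i with i*i <= n, combined by boolean short-circuit instead of A's list accumulation with any/all.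
import Mathlib
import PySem

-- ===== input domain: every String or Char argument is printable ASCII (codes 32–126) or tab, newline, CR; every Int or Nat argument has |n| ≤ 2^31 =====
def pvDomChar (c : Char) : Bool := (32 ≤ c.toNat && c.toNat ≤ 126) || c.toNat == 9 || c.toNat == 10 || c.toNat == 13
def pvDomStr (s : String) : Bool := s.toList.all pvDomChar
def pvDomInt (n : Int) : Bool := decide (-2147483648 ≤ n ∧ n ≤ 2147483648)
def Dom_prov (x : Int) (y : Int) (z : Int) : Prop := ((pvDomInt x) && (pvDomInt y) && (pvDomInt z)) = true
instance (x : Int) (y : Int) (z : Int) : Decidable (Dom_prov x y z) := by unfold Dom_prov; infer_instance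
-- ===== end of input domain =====

-- B replaces A's three copy-pasted divisor-counting scans up to n//2 with a shared
-- trial-division helper stopping at the first divisor with the i*i <= n bound,
-- combined by boolean short-circuit (objective: faster).

-- ===== PORT A =====
-- divisor count of a over range(2, a//2 + 1), as in each of A's three loops
def provCount (a : Int) : Int :=
  (PySem.List.pyRange 2 (PySem.Int.floordiv a 2 + 1) 1).foldl
    (fun k i => if PySem.Int.mod a i == 0 then k + 1 else k) 0

def prov (x : Int) (y : Int) (z : Int) : Bool :=
  let m : List Bool := []
  let a := x
  let k := provCount a
  if k ≤ 0 then
    let m := m ++ [true]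
    let a := y
    let k := provCount a
    let m := if k ≤ 0 then m ++ [true] else m ++ [false]
    let a := z
    let k := provCount a
    let m := if k ≤ 0 then m ++ [true] else m ++ [false]
    m.all id
  else
    let m := m ++ [false]
    m.any id

-- ===== PORT B =====
-- while i * i <= a: if a % i == 0: return False; i += 1; return True
def isPrimeLoop (a : Int) (i : Int) : Bool :=
  if _h : i * i ≤ a then
    if PySem.Int.mod a i == 0 then false
    else isPrimeLoop a (i + 1)
  else true
termination_by (a + 1 - i).toNat
decreasing_by
  have hi : i ≤ a := by nlinarith
  omega

def prov_alt (x : Int) (y : Int) (z : Int) : Bool :=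
  isPrimeLoop x 2 && (isPrimeLoop y 2 && isPrimeLoop z 2)

-- ===== PRECONDITION & SPEC =====
def Spec_prov (x : Int) (y : Int) (z : Int) (out : Bool) : Prop := out = prov_alt x y z
instance (x : Int) (y : Int) (z : Int) (out : Bool) : Decidable (Spec_prov x y z out) := by unfold Spec_prov; infer_instance

-- ===== CLAIM (what is proved, stated in full; the proofs are below) =====
def Claim_equal_prov : Prop := ∀ (x : Int) (y : Int) (z : Int), Dom_prov x y z → Spec_prov x y z (prov x y z)

-- ===== LEMMAS AND PROOFS =====

-- the counting fold is just countP, shifted by the accumulator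
theorem foldl_count_eq (p : Int → Bool) (l : List Int) (n : Int) :
    l.foldl (fun k i => if p i then k + 1 else k) n = n + l.countP p := by
  induction l generalizing n with
  | nil => simp
  | cons a t ih =>
    by_cases h : p a <;> simp [h, ih, Int.add_comm, Int.add_left_comm]

-- A's test: k ≤ 0 iff no divisor in [2, a//2]
theorem provCount_le_zero (a : Int) :
    provCount a ≤ 0 ↔ ∀ i : Int, 2 ≤ i → i ≤ PySem.Int.floordiv a 2 → ¬ (i ∣ a) := by
  unfold provCount
  rw [foldl_count_eq]
  simp only [zero_add]
  constructor
  · intro h i h2 hle hdvd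
    have hm : i ∈ PySem.List.pyRange 2 (PySem.Int.floordiv a 2 + 1) 1 := by
      rw [PySem.List.mem_pyRange_one]; omega
    have hp : 0 < (PySem.List.pyRange 2 (PySem.Int.floordiv a 2 + 1) 1).countP
        (fun i => PySem.Int.mod a i == 0) := by
      rw [List.countP_pos_iff]
      exact ⟨i, hm, by simp [PySem.Int.mod_eq_zero_iff_dvd]; exact hdvd⟩
    omega
  · intro h
    have : (PySem.List.pyRange 2 (PySem.Int.floordiv a 2 + 1) 1).countP
        (fun i => PySem.Int.mod a i == 0) = 0 := by
      rw [List.countP_eq_zero]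
      intro i hm
      rw [PySem.List.mem_pyRange_one] at hm
      simp [PySem.Int.mod_eq_zero_iff_dvd]
      exact h i hm.1 (by omega)
    omega

-- B's loop: true iff no divisor i ≥ j with i*i ≤ a
theorem isPrimeLoop_eq_true (a : Int) (j : Int) (hj : 2 ≤ j) :
    isPrimeLoop a j = true ↔ ∀ i : Int, j ≤ i → i * i ≤ a → ¬ (i ∣ a) := by
  induction j using isPrimeLoop.induct a with
  | case1 j h hdvd =>
    rw [isPrimeLoop, dif_pos h, if_pos hdvd]
    refine ⟨fun hc => absurd hc (by simp), fun hall => ?_⟩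
    exact absurd ((PySem.Int.mod_eq_zero_iff_dvd a j).mp (by simpa using hdvd)) (hall j le_rfl h)
  | case2 j h hnd ih =>
    rw [isPrimeLoop, dif_pos h, if_neg hnd, ih (by omega)]
    constructor
    · intro hall i hji hsq
      rcases lt_or_eq_of_le hji with hlt | heq
      · exact hall i (by omega) hsq
      · subst heq
        intro hd
        exact hnd (by simpa using (PySem.Int.mod_eq_zero_iff_dvd a _).mpr hd)
    · intro hall i hji hsq
      exact hall i (by omega) hsq
  | case3 j h =>
    rw [isPrimeLoop, dif_neg h]
    simp only [true_iff]
    intro i hji hsq hd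
    exact h (by nlinarith)

-- the two divisor ranges detect the same composites
theorem ranges_agree (a : Int) :
    (∀ i : Int, 2 ≤ i → i ≤ PySem.Int.floordiv a 2 → ¬ (i ∣ a)) ↔
    (∀ i : Int, 2 ≤ i → i * i ≤ a → ¬ (i ∣ a)) := by
  constructor
  · intro h i h2 hsq hd
    -- i*i ≤ a, 2 ≤ i ⇒ 2*i ≤ a ⇒ i ≤ a//2
    have h2i : 2 * i ≤ a := by nlinarith
    have : i ≤ PySem.Int.floordiv a 2 := by
      rw [PySem.Int.le_floordiv_iff_mul_le (by norm_num)]; linarith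
    exact h i h2 this hd
  · intro h i h2 hle hd
    obtain ⟨j, hj⟩ := hd
    have h2i : 2 * i ≤ a := by
      have := (PySem.Int.le_floordiv_iff_mul_le (b := 2) (by norm_num)).mp hle
      linarith
    have hj2 : 2 ≤ j := by nlinarith
    rcases le_total i j with hij | hij
    · exact h i h2 (by nlinarith) ⟨j, hj⟩
    · exact h j hj2 (by nlinarith) ⟨i, by linarith [hj]⟩

theorem test_agree (a : Int) : (decide (provCount a ≤ 0)) = isPrimeLoop a 2 := by
  have h := isPrimeLoop_eq_true a 2 (le_refl 2)
  by_cases hp : provCount a ≤ 0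
  · have : isPrimeLoop a 2 = true :=
      h.mpr ((ranges_agree a).mp ((provCount_le_zero a).mp hp))
    simp [hp, this]
  · have hf : isPrimeLoop a 2 = false := by
      cases hc : isPrimeLoop a 2
      · rfl
      · exact absurd ((provCount_le_zero a).mpr ((ranges_agree a).mpr (h.mp hc))) hp
    simp [hp, hf]

-- ===== VERDICT (by name: the statement is the Claim_ definition above) =====
theorem prov_spec : Claim_equal_prov := by
  intro x y z _
  unfold Spec_prov prov prov_alt
  simp only []
  rw [← test_agree x, ← test_agree y, ← test_agree z]
  by_cases hx : provCount x ≤ 0 <;> by_cases hy : provCount y ≤ 0 <;>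
    by_cases hz : provCount z ≤ 0 <;> simp [hx, hy, hz]
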